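-- pv_equiv track=rewrite | github.com/mbkloster/platopus | response/quote.py | unformatAuthor
-- ===== SOURCE A (Python) =====
-- def unformatAuthor(author):
-- 	""" Converts a formatted author name into a normal-looking one. """
-- 	newAuthor = "";
-- 	ignoreUnderline = 0;
-- 	for i in range(0,len(author)):
-- 		if (author[i] == "_"):
-- 			if (i < len(author)-1 and author[i+1] == "_"):
-- 				newAuthor += "_";
-- 				ignoreUnderline = 1;
-- 			elif (not ignoreUnderline):
-- 				newAuthor += " ";
-- 			else:
-- 				ignoreUnderline = 0;
-- 		else:
-- 			newAuthor += author[i];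
-- 	return newAuthor;
-- ===== SOURCE B (Python) =====
-- def unformatAuthor(author):
--     """ Converts a formatted author name into a normal-looking one. """
--     out = []
--     i = 0
--     n = len(author)
--     while i < n:
--         c = author[i]
--         if c == "_":
--             j = i
--             while j < n and author[j] == "_":
--                 j += 1
--             k = j - i
--             out.append(" " if k == 1 else "_" * (k - 1))
--             i = j
--         else:
--             out.append(c)
--             i += 1
--     return "".join(out)
-- ===== Notes on version B (the rewrite author's own statement) =====
-- stated objective: alternative
-- what changed: B collapses each maximal run of k consecutive underscores at once (space if k==1, k-1 underscores if k>=2) via an index that jumps over the run, instead of A's per-character scan with an ignoreUnderline flag.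
import Mathlib
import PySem

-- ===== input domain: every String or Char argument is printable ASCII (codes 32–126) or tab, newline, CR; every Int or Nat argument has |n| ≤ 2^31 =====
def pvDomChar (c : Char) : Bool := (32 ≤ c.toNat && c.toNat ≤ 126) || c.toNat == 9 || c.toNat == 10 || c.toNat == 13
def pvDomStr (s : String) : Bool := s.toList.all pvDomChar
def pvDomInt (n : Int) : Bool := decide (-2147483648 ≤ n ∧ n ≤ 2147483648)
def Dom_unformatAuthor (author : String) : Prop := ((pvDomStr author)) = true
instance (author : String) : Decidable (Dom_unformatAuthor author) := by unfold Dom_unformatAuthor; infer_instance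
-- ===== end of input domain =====

-- B collapses each maximal underscore run at once instead of A's per-character ignoreUnderline flag; same behaviour, alternative decomposition (no speed claim).

-- ===== PORT A =====
-- A's loop, character by character: at a '_', look at the next character; a '_'
-- there emits '_' and sets the flag, otherwise the flag decides between ' ' and nothing.
def unformatAuthorGo : List Char → Bool → List Char
  | [], _ => []
  | c :: rest, ignoreUnderline =>
    if c = '_' then
      if rest.head? = some '_' then
        '_' :: unformatAuthorGo rest true
      else if !ignoreUnderline then
        ' ' :: unformatAuthorGo rest false
      else
        unformatAuthorGo rest false
    else
      c :: unformatAuthorGo rest ignoreUnderline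

def unformatAuthor (author : String) : String :=
  String.ofList (unformatAuthorGo author.toList false)

-- ===== PORT B =====
-- B's loop: jump over each maximal run of underscores, emit its collapsed form.
def unformatAuthorAltGo : List Char → List Char
  | [] => []
  | c :: rest =>
    if c = '_' then
      let t := rest.takeWhile (fun x => x = '_')
      (if t.length + 1 = 1 then [' '] else List.replicate t.length '_')
        ++ unformatAuthorAltGo (rest.dropWhile (fun x => x = '_'))
    else
      c :: unformatAuthorAltGo rest
termination_by l => l.length
decreasing_by
  · have := List.length_dropWhile_le (fun x => x = '_') rest
    simp; omega
  · simp

def unformatAuthor_alt (author : String) : String :=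
  String.ofList (unformatAuthorAltGo author.toList)

-- ===== PRECONDITION & SPEC =====
def Spec_unformatAuthor (author : String) (out : String) : Prop := out = unformatAuthor_alt author
instance (author : String) (out : String) : Decidable (Spec_unformatAuthor author out) := by unfold Spec_unformatAuthor; infer_instance

-- ===== CLAIM (what is proved, stated in full; the proofs are below) =====
def Claim_equal_unformatAuthor : Prop := ∀ (author : String), Dom_unformatAuthor author → Spec_unformatAuthor author (unformatAuthor author)

-- ===== LEMMAS AND PROOFS =====

-- With the flag set, a run of k ≥ 1 underscores (followed by a non-underscore) emits k-1 underscores.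
theorem goA_run_true (k : Nat) (hk : 1 ≤ k) (rest : List Char)
    (h : rest.head? ≠ some '_') :
    unformatAuthorGo (List.replicate k '_' ++ rest) true
      = List.replicate (k - 1) '_' ++ unformatAuthorGo rest false := by
  induction k with
  | zero => omega
  | succ k ih =>
    cases k with
    | zero =>
      simp [unformatAuthorGo, h]
    | succ m =>
      have h1 : ((List.replicate (m + 1) '_' ++ rest).head? = some '_') := by
        simp [List.replicate_succ]
      rw [List.replicate_succ, List.cons_append, unformatAuthorGo]
      simp only [if_pos h1]
      rw [ih (by omega)]
      simp [List.replicate_succ]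

-- With the flag clear, a run of k ≥ 1 underscores emits ' ' (k = 1) or k-1 underscores (k ≥ 2).
theorem goA_run_false (k : Nat) (hk : 1 ≤ k) (rest : List Char)
    (h : rest.head? ≠ some '_') :
    unformatAuthorGo (List.replicate k '_' ++ rest) false
      = (if k = 1 then [' '] else List.replicate (k - 1) '_') ++ unformatAuthorGo rest false := by
  cases k with
  | zero => omega
  | succ k =>
    cases k with
    | zero =>
      simp [unformatAuthorGo, h]
    | succ m =>
      have h1 : ((List.replicate (m + 1) '_' ++ rest).head? = some '_') := by
        simp [List.replicate_succ]
      rw [List.replicate_succ, List.cons_append, unformatAuthorGo]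
      simp only [if_pos h1]
      rw [goA_run_true (m + 1) (by omega) rest h]
      simp [List.replicate_succ]

theorem takeWhile_underscore_eq_replicate (l : List Char) :
    l.takeWhile (fun x => x = '_') = List.replicate (l.takeWhile (fun x => x = '_')).length '_' := by
  rw [List.eq_replicate_iff]
  exact ⟨rfl, fun b hb => by simpa using (List.mem_takeWhile_imp hb)⟩

theorem head?_dropWhile_underscore (l : List Char) :
    (l.dropWhile (fun x => x = '_')).head? ≠ some '_' := by
  induction l with
  | nil => simp
  | cons c rest ih =>
    by_cases hc : c = '_'
    · simpa [hc] using ih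
    · simp [hc]

theorem goA_eq_goB (l : List Char) : unformatAuthorGo l false = unformatAuthorAltGo l := by
  induction l using unformatAuthorAltGo.induct with
  | case1 => simp [unformatAuthorGo, unformatAuthorAltGo]
  | case2 rest ih =>
    have hsplit : ('_' :: rest)
        = List.replicate ((rest.takeWhile (fun x => x = '_')).length + 1) '_'
            ++ rest.dropWhile (fun x => x = '_') := by
      rw [List.replicate_succ, List.cons_append]
      congr 1
      rw [← takeWhile_underscore_eq_replicate rest, List.takeWhile_append_dropWhile]
    conv_lhs => rw [hsplit]
    rw [goA_run_false _ (by omega) _ (head?_dropWhile_underscore rest), ih]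
    conv_rhs => rw [unformatAuthorAltGo.eq_def]
    simp
  | case3 c rest hc ih =>
    rw [unformatAuthorGo, unformatAuthorAltGo]
    simp only [if_neg hc, ih]

-- ===== VERDICT (by name: the statement is the Claim_ definition above) =====
theorem unformatAuthor_spec : Claim_equal_unformatAuthor := by
  intro author _
  unfold Spec_unformatAuthor unformatAuthor unformatAuthor_alt
  rw [goA_eq_goB]
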